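-- pv_equiv track=rewrite | github.com/jinkhye/MyFinMarkdown | src/evaluation/markdown_teds.py | _extract_raw_tables
-- ===== SOURCE A (Python) =====
-- from typing import List, Optional
--
-- def _extract_raw_tables(markdown_string: str) -> List[str]:
--     """Manually extracts table sections from a markdown string."""
--     tables, current_lines = [], []
--     in_table = False
--     for line in markdown_string.strip().split('\n'):
--         line_is_table_part = '|' in line and ('---' in line or len(line.strip()) > 2)
--         if line_is_table_part:
--             current_lines.append(line)
--             in_table = True
--         else:
--             if in_table:
--                 tables.append("\n".join(current_lines))
--                 current_lines = []
--             in_table = False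
--     if current_lines:
--         tables.append("\n".join(current_lines))
--     return tables
-- ===== SOURCE B (Python) =====
-- from typing import List
--
--
-- def _is_table_part(line: str) -> bool:
--     return '|' in line and ('---' in line or len(line.strip()) > 2)
--
--
-- def _extract_raw_tables(markdown_string: str) -> List[str]:
--     """Builds the table list back-to-front: scan the lines from last to first
--     and, per table line, either open a new block at the front of the result or
--     merge the line into the block just opened (no flag, buffer or final flush)."""
--     lines = markdown_string.strip().split('\n')
--     tables: List[str] = []
--     for i in range(len(lines) - 1, -1, -1):
--         line = lines[i]
--         if _is_table_part(line):
--             if i + 1 < len(lines) and _is_table_part(lines[i + 1]):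
--                 tables[0] = line + '\n' + tables[0]
--             else:
--                 tables.insert(0, line)
--     return tables
-- ===== Notes on version B (the rewrite author's own statement) =====
-- stated objective: alternative
-- what changed: Replaces A's forward scan with in_table flag, mutable line buffer and two flush sites by a reverse index scan that keeps no buffer or flag: each table line either opens a new block at the front of the result or is merged into the block opened by its successor line.
import Mathlib
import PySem

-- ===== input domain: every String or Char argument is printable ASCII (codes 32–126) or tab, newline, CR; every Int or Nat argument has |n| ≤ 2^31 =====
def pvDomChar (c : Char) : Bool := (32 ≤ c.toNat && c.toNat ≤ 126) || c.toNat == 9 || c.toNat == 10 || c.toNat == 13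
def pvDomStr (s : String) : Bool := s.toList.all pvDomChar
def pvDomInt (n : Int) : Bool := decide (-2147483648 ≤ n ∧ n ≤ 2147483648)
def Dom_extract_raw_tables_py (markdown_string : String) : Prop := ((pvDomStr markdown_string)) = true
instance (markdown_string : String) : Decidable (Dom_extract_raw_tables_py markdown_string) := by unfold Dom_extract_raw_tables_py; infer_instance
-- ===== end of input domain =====

-- B restructures A (alternative, same cost): a reverse index scan with no flag, buffer or flush —
-- each table line opens a new block at the front of the result or merges into the block just opened.

-- shared helper: the line predicate '|' in line and ('---' in line or len(line.strip()) > 2),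
-- identical text in both Pythons
def pvIsTablePart (line : String) : Bool :=
  PySem.Str.isIn "|" line &&
    (PySem.Str.isIn "---" line || decide ((2 : Int) < PySem.Str.len (PySem.Str.strip line)))

-- ===== PORT A =====
-- the for-loop's state: (tables, current_lines, in_table)
def pvGoA : List String → List String → List String → Bool →
    List String × List String × Bool
  | [], tables, cur, inT => (tables, cur, inT)
  | l :: ls, tables, cur, inT =>
    if pvIsTablePart l then
      pvGoA ls tables (cur ++ [l]) true
    else
      if inT then pvGoA ls (tables ++ [PySem.Str.join "\n" cur]) [] false
      else pvGoA ls tables cur false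

def extract_raw_tables_py (markdown_string : String) : List String :=
  let lines := (PySem.Str.split? (PySem.Str.strip markdown_string) "\n").getD []
  let st := pvGoA lines [] [] false
  if st.2.1 ≠ [] then st.1 ++ [PySem.Str.join "\n" st.2.1] else st.1

-- ===== PORT B =====
-- one iteration of Source B's 'for i in range(len(lines) - 1, -1, -1)' loop body;
-- the 'tables[0] = line + "\n" + tables[0]' assignment would raise IndexError on
-- an empty tables, but that state is unreachable (the successor line already
-- opened a block); the match's [] arm is that unreachable case.
def pvStepB (lines : List String) (tables : List String) (i : Int) : List String :=
  let line := PySem.List.pyGetD lines i ""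
  if pvIsTablePart line then
    if (i + 1 < PySem.List.len lines) ∧ pvIsTablePart (PySem.List.pyGetD lines (i + 1) "") then
      match tables with
      | t :: ts => (line ++ "\n" ++ t) :: ts
      | [] => []
    else PySem.List.insert tables 0 line
  else tables

def extract_raw_tables_py_alt (markdown_string : String) : List String :=
  let lines := (PySem.Str.split? (PySem.Str.strip markdown_string) "\n").getD []
  (PySem.List.pyRange (PySem.List.len lines - 1) (-1) (-1)).foldl (pvStepB lines) []

-- ===== PRECONDITION & SPEC =====
def Spec_extract_raw_tables_py (markdown_string : String) (out : List String) : Prop := out = extract_raw_tables_py_alt markdown_string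
instance (markdown_string : String) (out : List String) : Decidable (Spec_extract_raw_tables_py markdown_string out) := by unfold Spec_extract_raw_tables_py; infer_instance

-- ===== CLAIM (what is proved, stated in full; the proofs are below) =====
def Claim_equal_extract_raw_tables_py : Prop := ∀ (markdown_string : String), Dom_extract_raw_tables_py markdown_string → Spec_extract_raw_tables_py markdown_string (extract_raw_tables_py markdown_string)

-- ===== LEMMAS AND PROOFS =====

-- whether the first line of ls is a table line
def pvHeadPred : List String → Bool
  | [] => false
  | l :: _ => pvIsTablePart l

-- reference recursion both ports are reduced to: blocks of ls, built back-to-front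
def pvR : List String → List String
  | [] => []
  | l :: ls =>
    if pvIsTablePart l then
      match pvR ls, pvHeadPred ls with
      | t :: ts, true => (l ++ "\n" ++ t) :: ts
      | _, _ => l :: pvR ls
    else pvR ls

theorem pvR_ne_nil (ls : List String) (h : pvHeadPred ls = true) : pvR ls ≠ [] := by
  cases ls with
  | nil => simp [pvHeadPred] at h
  | cons l ls =>
    simp only [pvHeadPred] at h
    simp only [pvR, h, if_pos]
    rcases e : pvR ls with _ | ⟨t, ts⟩ <;> rcases e' : pvHeadPred ls <;> simp

-- string-level join steps (PySem.Chars.join_cons_cons / join_singleton lifted to String)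
theorem strJoin_singleton (a : String) : PySem.Str.join "\n" [a] = a := by
  have : (PySem.Str.join "\n" [a]).toList = a.toList := by
    simp [PySem.Chars.join_singleton]
  exact String.toList_injective this

theorem strJoin_cons_cons (a b : String) (rest : List String) :
    PySem.Str.join "\n" (a :: b :: rest) = a ++ "\n" ++ PySem.Str.join "\n" (b :: rest) := by
  have : (PySem.Str.join "\n" (a :: b :: rest)).toList
      = (a ++ "\n" ++ PySem.Str.join "\n" (b :: rest)).toList := by
    simp [PySem.Chars.join_cons_cons, String.toList_append]
  exact String.toList_injective this

theorem strJoin_append_singleton (cur : List String) (l : String) (h : cur ≠ []) :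
    PySem.Str.join "\n" (cur ++ [l]) = PySem.Str.join "\n" cur ++ "\n" ++ l := by
  induction cur with
  | nil => exact absurd rfl h
  | cons c cs ih =>
    cases cs with
    | nil => simp [strJoin_cons_cons, strJoin_singleton]
    | cons d ds =>
      have hne : d :: ds ≠ [] := by simp
      calc PySem.Str.join "\n" (c :: (d :: ds ++ [l]))
          = c ++ "\n" ++ PySem.Str.join "\n" (d :: ds ++ [l]) := by
            simpa using strJoin_cons_cons c d (ds ++ [l])
        _ = c ++ "\n" ++ (PySem.Str.join "\n" (d :: ds) ++ "\n" ++ l) := by rw [ih hne]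
        _ = PySem.Str.join "\n" (c :: d :: ds) ++ "\n" ++ l := by
            rw [strJoin_cons_cons c d ds]
            simp [String.append_assoc]

-- ===== A-side: A's fold equals pvR =====

-- A's remaining output from buffer 'cur', as a standalone forward recursion
def pvRuns (cur : List String) : List String → List String
  | [] => if cur = [] then [] else [PySem.Str.join "\n" cur]
  | l :: ls =>
    if pvIsTablePart l then pvRuns (cur ++ [l]) ls
    else if cur = [] then pvRuns [] ls
    else PySem.Str.join "\n" cur :: pvRuns [] ls

-- pvRuns with the empty buffer is pvR; with a nonempty buffer it finishes the
-- current run (merging into pvR's first block when the next line continues it)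
theorem pvRuns_eq (ls : List String) :
    (∀ cur : List String, cur ≠ [] →
      pvRuns cur ls =
        (match pvR ls, pvHeadPred ls with
         | t :: ts, true => (PySem.Str.join "\n" cur ++ "\n" ++ t) :: ts
         | _, _ => PySem.Str.join "\n" cur :: pvR ls)) ∧
    pvRuns [] ls = pvR ls := by
  induction ls with
  | nil =>
    refine ⟨fun cur hc => ?_, by simp [pvRuns, pvR]⟩
    simp [pvRuns, pvR, pvHeadPred, hc]
  | cons l ls ih =>
    have hh : pvHeadPred (l :: ls) = pvIsTablePart l := rfl
    constructor
    · intro cur hc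
      by_cases hp : pvIsTablePart l
      · rw [pvRuns, if_pos hp, ih.1 (cur ++ [l]) (by simp)]
        simp only [pvR, hp, hh, if_true]
        rcases e : pvR ls with _ | ⟨t, ts⟩ <;> rcases e' : pvHeadPred ls <;>
          simp [strJoin_append_singleton cur l hc, String.append_assoc]
      · rw [pvRuns, if_neg hp, if_neg hc, ih.2]
        simp [pvR, hh, hp]
    · by_cases hp : pvIsTablePart l
      · rw [pvRuns, if_pos hp, ih.1 ([] ++ [l]) (by simp)]
        simp only [List.nil_append, pvR, hp, if_true]
        rcases e : pvR ls with _ | ⟨t, ts⟩ <;> rcases e' : pvHeadPred ls <;>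
          simp [strJoin_singleton]
      · rw [pvRuns, if_neg hp, if_pos rfl, ih.2]
        simp [pvR, hp]

-- A's fold, finished by the final flush, equals tables ++ pvRuns cur ls,
-- provided in_table tracks nonemptiness of the buffer (true of every reachable state)
theorem pvGoA_eq (ls : List String) : ∀ (tables cur : List String),
    (let st := pvGoA ls tables cur (!cur.isEmpty)
     if st.2.1 ≠ [] then st.1 ++ [PySem.Str.join "\n" st.2.1] else st.1) =
      tables ++ pvRuns cur ls := by
  induction ls with
  | nil =>
    intro tables cur
    by_cases hc : cur = [] <;> simp [pvGoA, pvRuns, hc]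
  | cons l ls ih =>
    intro tables cur
    by_cases hp : pvIsTablePart l
    · have h1 : (!(cur ++ [l]).isEmpty) = true := by simp
      simpa [pvGoA, pvRuns, hp, h1] using ih tables (cur ++ [l])
    · by_cases hc : cur = []
      · subst hc
        simpa [pvGoA, pvRuns, hp] using ih tables []
      · have h1 : (!cur.isEmpty) = true := by simpa using hc
        rw [pvRuns, if_neg hp, if_neg hc]
        have := ih (tables ++ [PySem.Str.join "\n" cur]) []
        simp only [List.isEmpty_nil, Bool.not_true] at this
        simp [pvGoA, hp, h1, this]

-- ===== B-side: B's reverse fold equals pvR =====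

-- range(k, -1, -1) peels its first index
theorem pyRangeNeg_cons (k : Int) (h : 0 ≤ k) :
    PySem.List.pyRange k (-1) (-1) = k :: PySem.List.pyRange (k - 1) (-1) (-1) := by
  simp [PySem.List.pyRange]
  rw [if_pos (show (-1 : Int) < k by omega),
    show (if (0 : Int) < k then k.toNat else 0) = k.toNat by split_ifs <;> omega,
    show (k + 1).toNat = k.toNat + 1 by omega,
    List.range_succ_eq_map, List.map_cons, List.map_map]
  congr 1
  · simp
  · refine List.map_congr_left fun i _ => ?_
    simp only [Function.comp_apply]
    push_cast
    ring

-- one B-step at index k turns the blocks of the suffix after k into the blocks from k on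
theorem pvStepB_drop (lines : List String) (k : Nat) (hk : k < lines.length) :
    pvStepB lines (pvR (lines.drop (k + 1))) (k : Int) = pvR (lines.drop k) := by
  rw [List.drop_eq_getElem_cons hk]
  have hget : PySem.List.pyGetD lines (k : Int) "" = lines[k] := by
    rw [PySem.List.pyGetD_natCast]
    simp [hk]
  have hcond : ((k : Int) + 1 < PySem.List.len lines
        ∧ pvIsTablePart (PySem.List.pyGetD lines ((k : Int) + 1) "") = true)
      ↔ pvHeadPred (lines.drop (k + 1)) = true := by
    by_cases h1 : k + 1 < lines.length
    · rw [List.drop_eq_getElem_cons h1]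
      have : PySem.List.pyGetD lines ((k : Int) + 1) "" = lines[k + 1] := by
        have : ((k : Int) + 1) = ((k + 1 : Nat) : Int) := by push_cast; ring
        rw [this, PySem.List.pyGetD_natCast]
        simp [h1]
      simp only [this, pvHeadPred, PySem.List.len_eq]
      constructor
      · exact fun h => h.2
      · exact fun h => ⟨by exact_mod_cast h1, h⟩
    · have hd : lines.drop (k + 1) = [] := List.drop_eq_nil_of_le (by omega)
      simp only [hd, pvHeadPred, PySem.List.len_eq]
      constructor
      · rintro ⟨hlt, -⟩; exact absurd (by exact_mod_cast hlt) h1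
      · simp
  simp only [pvStepB, hget, pvR]
  by_cases hp : pvIsTablePart lines[k]
  · simp only [hp, if_pos]
    by_cases hc : pvHeadPred (lines.drop (k + 1)) = true
    · rw [if_pos (hcond.mpr hc), hc]
      rcases e : pvR (lines.drop (k + 1)) with _ | ⟨t, ts⟩
      · exact absurd e (pvR_ne_nil _ hc)
      · simp
    · rw [if_neg (fun h => hc (hcond.mp h))]
      rcases e : pvR (lines.drop (k + 1)) with _ | ⟨t, ts⟩ <;>
        rcases e' : pvHeadPred (lines.drop (k + 1)) with _ | _ <;>
          simp_all [PySem.List.insert_zero]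
  · simp [hp]

-- peeling the descending range from k-1 down to 0, starting from the suffix blocks
theorem pvFoldB_eq (lines : List String) :
    ∀ k : Nat, k ≤ lines.length →
      (PySem.List.pyRange ((k : Int) - 1) (-1) (-1)).foldl (pvStepB lines)
          (pvR (lines.drop k)) = pvR lines := by
  intro k
  induction k with
  | zero =>
    intro _
    simp
  | succ k ih =>
    intro hk
    have h1 : ((k + 1 : Nat) : Int) - 1 = (k : Int) := by push_cast; ring
    rw [h1, pyRangeNeg_cons (k : Int) (by positivity), List.foldl_cons,
      pvStepB_drop lines k (by omega)]
    exact ih (by omega)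

-- ===== VERDICT (by name: the statement is the Claim_ definition above) =====
theorem extract_raw_tables_py_spec : Claim_equal_extract_raw_tables_py := by
  intro s _
  unfold Spec_extract_raw_tables_py extract_raw_tables_py extract_raw_tables_py_alt
  have hA := pvGoA_eq ((PySem.Str.split? (PySem.Str.strip s) "\n").getD []) [] []
  simp only [List.isEmpty_nil, Bool.not_true, List.nil_append] at hA
  have hB := pvFoldB_eq ((PySem.Str.split? (PySem.Str.strip s) "\n").getD [])
    ((PySem.Str.split? (PySem.Str.strip s) "\n").getD []).length le_rfl
  simp only [List.drop_length, pvR] at hB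
  simp only [PySem.List.len_eq]
  rw [hA, (pvRuns_eq _).2, ← hB]
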